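-- pv_equiv track=rewrite | github.com/benzisoxazole/sugar-sugar | sugar_sugar/app.py | _count_valid_pairs_from_table_data
-- ===== SOURCE A (Python) =====
-- def _count_valid_pairs_from_table_data(table_data: list[dict[str, str]]) -> int:
--     if len(table_data) < 2:
--         return 0
--     actual_row = table_data[0]
--     prediction_row = table_data[1]
--     count = 0
--     for key, actual_str in actual_row.items():
--         if key == 'metric':
--             continue
--         pred_str = prediction_row.get(key, "-")
--         if actual_str != "-" and pred_str != "-":
--             count += 1
--     return count
-- ===== SOURCE B (Python) =====
-- def _count_valid_pairs_from_table_data(table_data: list[dict[str, str]]) -> int: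
--     if len(table_data) < 2:
--         return 0
--     actual_row, prediction_row = table_data[0], table_data[1]
--     actual_valid = {k for k, v in actual_row.items() if k != 'metric' and v != '-'}
--     pred_valid = {k for k, v in prediction_row.items() if v != '-'}
--     return len(actual_valid & pred_valid)
-- ===== Notes on version B (the rewrite author's own statement) =====
-- stated objective: alternative
-- what changed: Replaces the single interleaved pass with per-key dict lookups by two independent scans building the sets of valid-column keys of each row, returning the size of their intersection; Pre_ excludes association lists whose first two rows carry duplicate keys, which no Python dict can represent.
import Mathlib
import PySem

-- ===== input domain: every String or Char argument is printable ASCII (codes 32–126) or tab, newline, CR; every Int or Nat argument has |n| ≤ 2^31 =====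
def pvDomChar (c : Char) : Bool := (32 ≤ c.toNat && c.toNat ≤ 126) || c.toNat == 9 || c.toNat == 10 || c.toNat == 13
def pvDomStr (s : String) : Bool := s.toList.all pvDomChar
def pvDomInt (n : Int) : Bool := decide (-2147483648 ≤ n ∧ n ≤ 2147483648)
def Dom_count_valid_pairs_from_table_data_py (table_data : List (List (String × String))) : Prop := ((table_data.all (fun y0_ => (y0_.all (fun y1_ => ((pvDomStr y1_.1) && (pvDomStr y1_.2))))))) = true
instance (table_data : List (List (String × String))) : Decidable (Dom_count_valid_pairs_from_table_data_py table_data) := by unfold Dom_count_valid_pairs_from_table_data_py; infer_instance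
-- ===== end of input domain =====

-- B rebuilds the count as the intersection of the two rows' valid-key sets (two independent scans)
-- instead of A's single interleaved pass with per-key lookups; alternative decomposition, no speed claim.


-- ===== PORT A =====
-- the 'len(table_data) < 2 → 0' guard becomes the wildcard match arm
def count_valid_pairs_from_table_data_py (table_data : List (List (String × String))) : Int :=
  match table_data with
  | actual_row :: prediction_row :: _ =>
      actual_row.foldl (fun count kv =>
        if kv.1 == "metric" then count
        else
          let pred_str := (List.lookup kv.1 prediction_row).getD "-"
          if kv.2 != "-" && pred_str != "-" then count + 1 else count) 0
  | _ => 0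

-- ===== PORT B =====
def count_valid_pairs_from_table_data_py_alt (table_data : List (List (String × String))) : Int :=
  if table_data.length < 2 then 0
  else
    let actual_row := table_data.headD []
    let prediction_row := table_data.tail.headD []
    let actual_valid : PySem.Set String :=
      PySem.Set.ofList ((actual_row.filter (fun kv => kv.1 != "metric" && kv.2 != "-")).map Prod.fst)
    let pred_valid : PySem.Set String :=
      PySem.Set.ofList ((prediction_row.filter (fun kv => kv.2 != "-")).map Prod.fst)
    PySem.Set.len (PySem.Set.inter actual_valid pred_valid)

-- ===== PRECONDITION & SPEC =====
-- Pre_ excludes association lists whose first two rows carry duplicate keys: those encode no Python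
-- dict (duplicate dict keys collapse in Python), so A never runs on them.
def Pre_count_valid_pairs_from_table_data_py (table_data : List (List (String × String))) : Prop :=
  ∀ r ∈ table_data.take 2, (r.map Prod.fst).Nodup
instance (table_data : List (List (String × String))) : Decidable (Pre_count_valid_pairs_from_table_data_py table_data) := by unfold Pre_count_valid_pairs_from_table_data_py; infer_instance

def pvWitness_count_valid_pairs_from_table_data_py : (List (List (String × String))) :=
  [[("metric", "mse"), ("a", "1"), ("b", "-")], [("a", "2"), ("b", "3")]]

def Spec_count_valid_pairs_from_table_data_py (table_data : List (List (String × String))) (out : Int) : Prop := out = count_valid_pairs_from_table_data_py_alt table_data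
instance (table_data : List (List (String × String))) (out : Int) : Decidable (Spec_count_valid_pairs_from_table_data_py table_data out) := by unfold Spec_count_valid_pairs_from_table_data_py; infer_instance

-- ===== CLAIM (what is proved, stated in full; the proofs are below) =====
def Claim_equal_count_valid_pairs_from_table_data_py : Prop := ∀ (table_data : List (List (String × String))), Dom_count_valid_pairs_from_table_data_py table_data → Pre_count_valid_pairs_from_table_data_py table_data → Spec_count_valid_pairs_from_table_data_py table_data (count_valid_pairs_from_table_data_py table_data)

-- ===== LEMMAS AND PROOFS =====

-- A's loop computed into a countP
theorem foldA_eq_countP (pred : List (String × String)) (row : List (String × String)) (c : Int) :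
    row.foldl (fun count kv =>
        if kv.1 == "metric" then count
        else
          let pred_str := (List.lookup kv.1 pred).getD "-"
          if kv.2 != "-" && pred_str != "-" then count + 1 else count) c
      = c + (row.countP (fun kv =>
          kv.1 != "metric" && (kv.2 != "-" && (List.lookup kv.1 pred).getD "-" != "-"))) := by
  induction row generalizing c with
  | nil => simp
  | cons kv rest ih =>
      simp only [List.foldl_cons, List.countP_cons, ih]
      by_cases h1 : kv.1 = "metric"
      · simp [h1]
      · by_cases h2 : kv.2 = "-"
        · simp [h1, h2]
        · by_cases h3 : (List.lookup kv.1 pred).getD "-" = "-"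
          · simp [h1, h2, h3]
          · simp [h1, h2, h3]
            ring

-- getD ≠ "-" characterised by membership among pred's valid keys, for nodup-key pred
theorem getD_ne_dash_iff (pred : List (String × String)) (hnd : (pred.map Prod.fst).Nodup) (k : String) :
    ((List.lookup k pred).getD "-" ≠ "-") ↔ k ∈ (pred.filter (fun kv => kv.2 != "-")).map Prod.fst := by
  induction pred with
  | nil => simp [List.lookup]
  | cons kv rest ih =>
      simp only [List.map_cons, List.nodup_cons] at hnd
      by_cases hk : kv.1 = k
      · have hnot : k ∉ (rest.filter (fun kv => kv.2 != "-")).map Prod.fst := by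
          intro hmem
          rcases List.mem_map.1 hmem with ⟨p, hp, hpk⟩
          exact hnd.1 (hk ▸ (List.mem_map.2 ⟨p, List.mem_of_mem_filter hp, hpk⟩))
        by_cases hv : kv.2 = "-" <;>
          simp [List.lookup, hk, hv, hnot]
      · have hb : (k == kv.1) = false := beq_eq_false_iff_ne.mpr (Ne.symm hk)
        have hstep : (List.lookup k (kv :: rest)).getD "-" = (List.lookup k rest).getD "-" := by
          simp [List.lookup, hb]
        rw [hstep]
        by_cases hv : kv.2 = "-" <;>
          simp [hv, ih hnd.2, Ne.symm hk]

-- ===== VERDICT (by name: the statement is the Claim_ definition above) =====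
theorem count_valid_pairs_from_table_data_py_spec : Claim_equal_count_valid_pairs_from_table_data_py := by
  intro table_data _hdom hpre
  unfold Spec_count_valid_pairs_from_table_data_py
  match table_data with
  | [] => rfl
  | [_] => rfl
  | actual_row :: prediction_row :: rest =>
    have hA : (actual_row.map Prod.fst).Nodup := hpre actual_row (by simp)
    have hP : (prediction_row.map Prod.fst).Nodup := hpre prediction_row (by simp)
    simp only [count_valid_pairs_from_table_data_py, count_valid_pairs_from_table_data_py_alt]
    rw [if_neg (by simp), foldA_eq_countP]
    simp only [List.headD, List.tail]
    have hksA : ((actual_row.filter (fun kv => kv.1 != "metric" && kv.2 != "-")).map Prod.fst).Nodup :=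
      List.Nodup.sublist (List.Sublist.map Prod.fst List.filter_sublist) hA
    rw [PySem.Set.ofList_eq_self_of_nodup _ hksA, zero_add]
    simp only [PySem.Set.inter, PySem.Set.len, ← List.countP_eq_length_filter,
      List.countP_map, List.countP_filter]
    congr 1
    apply List.countP_congr
    intro kv _
    by_cases h1 : kv.1 = "metric" <;> by_cases h2 : kv.2 = "-" <;>
      simp [h1, h2, PySem.Set.mem_ofList,
        ← getD_ne_dash_iff prediction_row hP kv.1]
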